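-- pv_equiv track=rewrite | github.com/Ailycus/smallAlgorithm | minGroup/minGroup_backup.py | init_groups
-- ===== SOURCE A (Python) =====
-- def init_groups(data, max_th):
--     '''
--         数据从大到小排序
--         依次将序列的最大值加入分组，如果当前最大值小于可用空间，则循环判断依次向后查找能够放入该组的最大值并放入，直到当前组剩余空间小于目前序列的最小值。
--     '''
--     result = []
--     res = []
--     diff = max_th
--     loss = 0 # 总loss值
--
--     # 对数据由大到小排序
--     sort_data = sorted(data, reverse=True)
--
--     while len(sort_data) > 0:
--         if max_th <= sort_data[0]: # 最大值大于max_th，单独作为一组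
--             res.append(sort_data[0])
--             # loss += (max_th-sort_data[0]) # 如果单个数值大于max_th，则不计loss
--             del sort_data[0]
--             continue
--         elif diff == max_th and sum(sort_data) <= max_th: # 剩余数据之和小于max_th，作为组后一组
--             result.append(sort_data)
--             loss += (max_th - sum(sort_data))
--             break
--         elif diff >= sort_data[0]:  # 剩余空间大于当前最大值，则加入
--             res.append(sort_data[0])
--             diff = diff - sort_data[0]  # 剩余空间
--             del sort_data[0]  # 删除该值
--         else:   # 最大值大于diff
--             del_index = []
--             if diff >= sort_data[-1]:
--                 for i, v in enumerate(sort_data):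
--                     if diff < sort_data[-1]:
--                         break
--                     if diff >= v:
--                         res.append(v)
--                         diff = diff - v
--                         del_index.append(i)
--                 sort_data = [v for i, v in enumerate(sort_data) if i not in del_index]
--
--             result.append(res)
--             loss += (max_th - sum(res))
--             res = []
--             diff = max_th
--
--     # 返回分组结果，总loss以及单个数据的组数
--     return result, loss
-- ===== SOURCE B (Python) =====
-- def _rightmost_le(a, x, hi):
--     # index of the rightmost element of a[0:hi] that is <= x, or -1 (binary search; a ascending)
--     lo = 0
--     while lo < hi:
--         mid = (lo + hi) // 2
--         if a[mid] <= x: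
--             lo = mid + 1
--         else:
--             hi = mid
--     return lo - 1
--
--
-- def init_groups(data, max_th):
--     asc = sorted(data)          # ascending; the largest remaining value is asc[-1]
--     total = sum(asc)            # running sum of the remaining values
--     result = []
--     res = []
--     diff = max_th
--     loss = 0
--     while asc:
--         top = asc[-1]
--         if max_th <= top:                       # oversized value: goes into the open group as-is
--             res.append(top)
--             asc.pop()
--             total -= top
--             continue
--         if diff == max_th and total <= max_th:  # everything left fits into one fresh group
--             result.append(asc[::-1])
--             loss += max_th - total
--             break
--         if diff >= top:                         # largest value fits into the open group
--             res.append(top)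
--             diff -= top
--             total -= top
--             asc.pop()
--             continue
--         # close the group: greedily pull in the largest values that still fit,
--         # scanning right-to-left via binary search instead of a linear pass
--         m = asc[0]
--         if diff >= m:
--             hi = len(asc)
--             while diff >= m:
--                 j = _rightmost_le(asc, diff, hi)
--                 if j < 0:
--                     break
--                 v = asc.pop(j)
--                 res.append(v)
--                 diff -= v
--                 total -= v
--                 hi = j
--         result.append(res)
--         loss += max_th - sum(res)
--         res = []
--         diff = max_th
--     return result, loss
-- ===== Notes on version B (the rewrite author's own statement) =====
-- stated objective: faster
-- what changed: A repeatedly deletes the front of a descending list, re-sums the remainder at every group start, and fills each group by a linear scan plus an index-filter rebuild of the whole list; B keeps the values in one ascending list popped from the tail, maintains a running sum, and fills each group by binary-searching (over a shrinking prefix) for the largest value that still fits, so no list is ever rebuilt or re-summed.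
import Mathlib
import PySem

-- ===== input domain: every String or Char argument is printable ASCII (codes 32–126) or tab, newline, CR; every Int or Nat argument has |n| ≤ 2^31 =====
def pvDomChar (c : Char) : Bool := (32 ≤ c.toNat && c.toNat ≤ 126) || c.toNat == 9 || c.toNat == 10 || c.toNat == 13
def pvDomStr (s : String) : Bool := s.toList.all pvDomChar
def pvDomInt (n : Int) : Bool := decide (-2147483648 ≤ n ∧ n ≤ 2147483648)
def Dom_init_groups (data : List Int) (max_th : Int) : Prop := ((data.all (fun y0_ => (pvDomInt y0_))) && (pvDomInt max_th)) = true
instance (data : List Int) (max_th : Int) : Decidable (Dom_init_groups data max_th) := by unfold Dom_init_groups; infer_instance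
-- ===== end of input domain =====

-- B replaces A's quadratic delete/rescan/rebuild greedy (del sort_data[0], sum() per group, inner
-- linear scan + index filter) with pops off the tail of an ascending list, a running sum, and a
-- hand-written binary search for the largest value that still fits; measurably faster.

-- ===== PORT A =====
-- inner 'for i, v in enumerate(sort_data)' loop of A's last branch: collects picked values into
-- res and their indices into del_index, breaking when diff < sort_data[-1] (= m, fixed)
def innerForA (m : Int) : List Int → Int → Int → List Int → List Int → List Int × List Int
  | [], _, _, res, del => (res, del)
  | v :: t, i, d, res, del =>
    if d < m then (res, del)
    else if v ≤ d then innerForA m t (i + 1) (d - v) (res ++ [v]) (del ++ [i])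
    else innerForA m t (i + 1) d res del

-- A's 'while len(sort_data) > 0' loop; fuel bounds the iteration count (each iteration either
-- removes an element or resets diff to max_th and the next one removes one or returns)
def aLoop (max_th : Int) : Nat → List Int → List (List Int) → List Int → Int → Int → List (List Int) × Int
  | 0, _, result, _, _, loss => (result, loss)
  | fuel + 1, sort_data, result, res, diff, loss =>
    if sort_data.isEmpty then (result, loss)
    else
      let s0 := sort_data.headD 0    -- sort_data[0], list nonempty
      if max_th ≤ s0 then
        aLoop max_th fuel sort_data.tail result (res ++ [s0]) diff loss
      else if diff = max_th ∧ sort_data.sum ≤ max_th then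
        (result ++ [sort_data], loss + (max_th - sort_data.sum))
      else if s0 ≤ diff then
        aLoop max_th fuel sort_data.tail result (res ++ [s0]) (diff - s0) loss
      else
        let m := sort_data.getLastD 0    -- sort_data[-1], list nonempty
        let pr := if m ≤ diff then innerForA m sort_data 0 diff res [] else (res, [])
        -- sort_data = [v for i, v in enumerate(sort_data) if i not in del_index]
        let sort_data' := if m ≤ diff then
            ((PySem.List.enumerate sort_data 0).filter (fun p => !(pr.2.contains p.1))).map Prod.snd
          else sort_data
        aLoop max_th fuel sort_data' (result ++ [pr.1]) [] max_th (loss + (max_th - pr.1.sum))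

def init_groups (data : List Int) (max_th : Int) : List (List Int) × Int :=
  let sort_data := PySem.List.sorted data (fun x => x) true   -- sorted(data, reverse=True)
  aLoop max_th (2 * data.length + 1) sort_data [] [] max_th 0

-- ===== PORT B =====
-- _rightmost_le(a, x, hi): binary search over the ascending prefix a[0:hi]; the structural
-- fuel only makes the loop total (hi - lo shrinks each step, so fuel = hi always suffices,
-- and the fuel-guard value equals the loop-exit value lo - 1)
def rmlGo (a : List Int) (x : Int) : Nat → Nat → Nat → Int
  | 0, lo, _ => (lo : Int) - 1
  | fuel + 1, lo, hi =>
    if lo < hi then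
      -- mid = (lo + hi) // 2; a[mid] is always in range when called by bInner
      match PySem.List.pyGet? a (((lo + hi) / 2 : Nat) : Int) with
      | some v => if v ≤ x then rmlGo a x fuel ((lo + hi) / 2 + 1) hi
                  else rmlGo a x fuel lo ((lo + hi) / 2)
      | none => (lo : Int) - 1                     -- unreachable totality guard
    else (lo : Int) - 1

-- B's inner 'while diff >= m' loop: pop the largest remaining value ≤ diff (found by binary
-- search, restricted to indices below the previous pick) until nothing fits or diff < m;
-- hi strictly decreases each iteration, so structural fuel = hi + 1 always suffices
def bInner (d m : Int) : Nat → List Int → Nat → List Int → Int → List Int × List Int × Int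
  | 0, asc, _, res, total => (asc, res, total)     -- unreachable fuel guard
  | fuel + 1, asc, hi, res, total =>
    if m ≤ d then
      let j := rmlGo asc d hi 0 hi
      if j < 0 then (asc, res, total)
      else
        match PySem.List.pop? asc j with
        | some (v, asc') => bInner (d - v) m fuel asc' j.toNat (res ++ [v]) (total - v)
        | none => (asc, res, total)                -- unreachable totality guard
    else (asc, res, total)

-- B's 'while asc' loop (same iteration count as A's loop, same fuel)
def bLoop (max_th : Int) : Nat → List Int → Int → List (List Int) → List Int → Int → Int → List (List Int) × Int
  | 0, _, _, result, _, _, loss => (result, loss)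
  | fuel + 1, asc, total, result, res, diff, loss =>
    if asc.isEmpty then (result, loss)
    else
      let top := asc.getLastD 0    -- asc[-1], list nonempty
      if max_th ≤ top then
        bLoop max_th fuel asc.dropLast (total - top) result (res ++ [top]) diff loss
      else if diff = max_th ∧ total ≤ max_th then
        (result ++ [asc.reverse], loss + (max_th - total))   -- asc[::-1] (PySem.List.slice?_none_none_neg_one)
      else if top ≤ diff then
        bLoop max_th fuel asc.dropLast (total - top) result (res ++ [top]) (diff - top) loss
      else
        let m := asc.headD 0       -- asc[0], list nonempty
        let t3 := if m ≤ diff then bInner diff m (asc.length + 1) asc asc.length res total else (asc, res, total)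
        bLoop max_th fuel t3.1 t3.2.2 (result ++ [t3.2.1]) [] max_th (loss + (max_th - t3.2.1.sum))

def init_groups_alt (data : List Int) (max_th : Int) : List (List Int) × Int :=
  let asc := PySem.List.sorted data (fun x => x) false   -- sorted(data)
  bLoop max_th (2 * data.length + 1) asc asc.sum [] [] max_th 0

-- ===== PRECONDITION & SPEC =====
def Spec_init_groups (data : List Int) (max_th : Int) (out : List (List Int) × Int) : Prop := out = init_groups_alt data max_th
instance (data : List Int) (max_th : Int) (out : List (List Int) × Int) : Decidable (Spec_init_groups data max_th out) := by unfold Spec_init_groups; infer_instance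

-- ===== CLAIM (what is proved, stated in full; the proofs are below) =====
def Claim_equal_init_groups : Prop := ∀ (data : List Int) (max_th : Int), Dom_init_groups data max_th → Spec_init_groups data max_th (init_groups data max_th)

-- ===== LEMMAS AND PROOFS =====

-- clean characterisation of one inner pass over the descending list s, starting index k,
-- remaining space d, break threshold m: (picked values, their indices, kept values)
def scanI (m : Int) : List Int → Int → Int → List Int × List Int × List Int
  | [], _, _ => ([], [], [])
  | v :: t, k, d =>
    if d < m then ([], [], v :: t)
    else if v ≤ d then
      let r := scanI m t (k + 1) (d - v)
      (v :: r.1, k :: r.2.1, r.2.2)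
    else
      let r := scanI m t (k + 1) d
      (r.1, r.2.1, v :: r.2.2)

theorem innerForA_eq (m : Int) (t : List Int) : ∀ (k d : Int) (res del : List Int),
    innerForA m t k d res del = (res ++ (scanI m t k d).1, del ++ (scanI m t k d).2.1) := by
  induction t with
  | nil => simp [innerForA, scanI]
  | cons v t ih =>
    intro k d res del
    simp only [innerForA, scanI]
    split
    · simp
    · split
      · rw [ih]; simp
      · rw [ih]

theorem scanI_idx_ge (m : Int) (t : List Int) : ∀ (k d : Int),
    ∀ i ∈ (scanI m t k d).2.1, k ≤ i := by
  induction t with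
  | nil => simp [scanI]
  | cons v t ih =>
    intro k d i hi
    simp only [scanI] at hi
    split at hi
    · simp at hi
    · split at hi
      · simp at hi
        rcases hi with h | h
        · omega
        · have := ih (k+1) _ _ h; omega
      · have := ih (k+1) _ _ hi; omega

theorem filter_enum_all (t : List Int) (k : Int) (pre : List Int) (hpre : ∀ j ∈ pre, j < k) :
    ((PySem.List.enumerate t k).filter (fun p => !(pre.contains p.1))).map Prod.snd = t := by
  have : (PySem.List.enumerate t k).filter (fun p => !(pre.contains p.1))
      = PySem.List.enumerate t k := by
    apply List.filter_eq_self.mpr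
    intro p hp
    rcases (PySem.List.mem_enumerate_iff _ _ _).mp hp with ⟨j, hj, rfl⟩
    simp only [Bool.not_eq_eq_eq_not, Bool.not_true, List.contains_eq_mem, decide_eq_false_iff_not]
    intro hmem
    have := hpre _ hmem
    omega
  rw [this, PySem.List.map_snd_enumerate]

theorem scanI_filter (m : Int) (t : List Int) : ∀ (k d : Int) (pre : List Int),
    (∀ j ∈ pre, j < k) →
    ((PySem.List.enumerate t k).filter
        (fun p => !((pre ++ (scanI m t k d).2.1).contains p.1))).map Prod.snd
      = (scanI m t k d).2.2 := by
  induction t with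
  | nil => simp [scanI]
  | cons v t ih =>
    intro k d pre hpre
    simp only [scanI]
    split
    · simpa using filter_enum_all (v :: t) k pre hpre
    · rw [PySem.List.enumerate_cons]
      split
      · -- picked: index k goes to del_index, (k, v) is filtered out
        rw [List.filter_cons]
        have hc : ((pre ++ k :: (scanI m t (k+1) (d-v)).2.1).contains k) = true := by
          simp [List.contains_eq_mem]
        simp only [hc, Bool.not_true, Bool.false_eq_true, if_false]
        have := ih (k+1) (d-v) (pre ++ [k]) (by
          intro j hj
          rcases List.mem_append.mp hj with h | h
          · have := hpre _ h; omega
          · simp at h; omega)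
        simpa [List.append_assoc] using this
      · -- kept: (k, v) survives the filter
        rw [List.filter_cons]
        have hc : ((pre ++ (scanI m t (k+1) d).2.1).contains k) = false := by
          simp only [List.contains_eq_mem, List.mem_append, decide_eq_false_iff_not]
          rintro (h | h)
          · have := hpre _ h; omega
          · have := scanI_idx_ge m t (k+1) d _ h; omega
        simp only [hc, Bool.not_false, if_pos, List.map_cons]
        exact congrArg _ (ih (k+1) d pre (fun j hj => by have := hpre _ hj; omega))

theorem scanI_kept_sublist (m : Int) (t : List Int) : ∀ (k d : Int),
    (scanI m t k d).2.2.Sublist t := by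
  induction t with
  | nil => simp [scanI]
  | cons v t ih =>
    intro k d
    simp only [scanI]
    split
    · simp
    · split
      · exact (ih _ _).cons _
      · exact (ih _ _).cons₂ _

theorem scanI_sum (m : Int) (t : List Int) : ∀ (k d : Int),
    (scanI m t k d).1.sum + (scanI m t k d).2.2.sum = t.sum := by
  induction t with
  | nil => simp [scanI]
  | cons v t ih =>
    intro k d
    simp only [scanI]
    split
    · simp
    · split
      · simp only [List.sum_cons]; have := ih (k+1) (d-v); omega
      · simp only [List.sum_cons]; have := ih (k+1) d; omega

theorem scanI_k_irrel (m : Int) (t : List Int) : ∀ (k k' d : Int),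
    (scanI m t k d).1 = (scanI m t k' d).1 ∧ (scanI m t k d).2.2 = (scanI m t k' d).2.2 := by
  induction t with
  | nil => simp [scanI]
  | cons v t ih =>
    intro k k' d
    simp only [scanI]
    split
    · simp
    · split
      · have := ih (k+1) (k'+1) (d-v); simp [this.1, this.2]
      · have := ih (k+1) (k'+1) d; simp [this.1, this.2]

theorem scanI_append_gt (m : Int) (pre : List Int) : ∀ (t : List Int) (k d : Int),
    (∀ x ∈ pre, d < x) → m ≤ d →
    (scanI m (pre ++ t) k d).1 = (scanI m t k d).1 ∧
      (scanI m (pre ++ t) k d).2.2 = pre ++ (scanI m t k d).2.2 := by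
  induction pre with
  | nil => simp
  | cons p pre ih =>
    intro t k d h hdm
    have hp : d < p := h p (by simp)
    simp only [List.cons_append, scanI, if_neg (by omega : ¬ d < m), if_neg (by omega : ¬ p ≤ d)]
    have := ih t (k+1) d (fun x hx => h x (by simp [hx])) hdm
    have hk := scanI_k_irrel m t (k+1) k d
    refine ⟨?_, ?_⟩
    · rw [this.1, hk.1]
    · simp only [this.2, hk.2]

theorem scanI_nopick (m : Int) (t : List Int) : ∀ (k d : Int), m ≤ d →
    (∀ x ∈ t, d < x) → scanI m t k d = ([], [], t) := by
  induction t with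
  | nil => simp [scanI]
  | cons v t ih =>
    intro k d hdm h
    have hv : d < v := h v (by simp)
    simp only [scanI, if_neg (by omega : ¬ d < m), if_neg (by omega : ¬ v ≤ d)]
    rw [ih (k+1) d hdm (fun x hx => h x (by simp [hx]))]

theorem rmlGo_correct (ys ws zs : List Int) (x : Int)
    (hys : ∀ y ∈ ys, y ≤ x) (hws : ∀ w ∈ ws, x < w) :
    ∀ (fuel lo hi : Nat), hi - lo ≤ fuel → lo ≤ ys.length → ys.length ≤ hi → hi ≤ ys.length + ws.length →
      rmlGo (ys ++ ws ++ zs) x fuel lo hi = (ys.length : Int) - 1 := by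
  intro fuel
  induction fuel with
  | zero =>
    intro lo hi h1 h2 h3 h4
    simp only [rmlGo]
    omega
  | succ fuel ih =>
    intro lo hi h1 h2 h3 h4
    rw [rmlGo]
    by_cases hlh : lo < hi
    · rw [if_pos hlh]
      have hmid1 : lo ≤ (lo + hi) / 2 := by omega
      have hmid2 : (lo + hi) / 2 < hi := by omega
      have hmlt : (lo + hi) / 2 < (ys ++ ws ++ zs).length := by
        simp only [List.length_append]; omega
      have hget : PySem.List.pyGet? (ys ++ ws ++ zs) (((lo + hi) / 2 : Nat) : Int)
          = some ((ys ++ ws ++ zs)[(lo + hi) / 2]) := by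
        rw [PySem.List.pyGet?_natCast]
        exact List.getElem?_eq_getElem hmlt
      rw [hget]
      by_cases hcase : (lo + hi) / 2 < ys.length
      · have hv : (ys ++ ws ++ zs)[(lo + hi) / 2] = ys[(lo + hi) / 2] := by
          rw [List.getElem_append_left (by simp [List.length_append]; omega)]
          exact List.getElem_append_left hcase
        simp only [hv]
        rw [if_pos (hys _ (List.getElem_mem hcase))]
        exact ih ((lo + hi) / 2 + 1) hi (by omega) (by omega) h3 h4
      · have hle : ys.length ≤ (lo + hi) / 2 := by omega
        have hlt2 : (lo + hi) / 2 - ys.length < ws.length := by omega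
        have hv : (ys ++ ws ++ zs)[(lo + hi) / 2]
            = ws[(lo + hi) / 2 - ys.length] := by
          rw [List.getElem_append_left (by simp [List.length_append]; omega)]
          exact List.getElem_append_right hle
        simp only [hv]
        rw [if_neg (by have := hws _ (List.getElem_mem hlt2); omega)]
        exact ih lo ((lo + hi) / 2) (by omega) h2 (by omega) (by omega)
    · rw [if_neg hlh]
      omega

theorem bInner_eq (m : Int) : ∀ (fuel : Nat) (s : List Int), List.Pairwise (· ≥ ·) s →
    s.length < fuel →
    ∀ (tail : List Int) (d : Int) (res : List Int) (total : Int),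
    bInner d m fuel (s.reverse ++ tail) s.length res total
      = ((scanI m s 0 d).2.2.reverse ++ tail, res ++ (scanI m s 0 d).1,
         total - (scanI m s 0 d).1.sum) := by
  intro fuel
  induction fuel with
  | zero => intro s _ h; omega
  | succ fuel ih =>
    intro s hpw hflen tail d res total
    rw [bInner]
    by_cases hdm : m ≤ d
    · rw [if_pos hdm]
      by_cases hex : ∃ y ∈ s, y ≤ d
      · -- s = pre ++ v :: suf, pre all > d, v the first (hence largest) value ≤ d
        obtain ⟨pre, v, suf, hs, hpre, hv⟩ :
            ∃ pre v suf, s = pre ++ v :: suf ∧ (∀ x ∈ pre, d < x) ∧ v ≤ d := by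
          refine ⟨s.takeWhile (fun x => decide (d < x)), ?_⟩
          rcases hrest : s.dropWhile (fun x => decide (d < x)) with _ | ⟨v, suf⟩
          · exfalso
            obtain ⟨y, hy, hyd⟩ := hex
            have := (List.dropWhile_eq_nil_iff.mp hrest) y hy
            simp at this; omega
          · refine ⟨v, suf, ?_, ?_, ?_⟩
            · rw [← hrest, List.takeWhile_append_dropWhile]
            · intro x hx
              have := List.mem_takeWhile_imp hx
              simpa using this
            · have := List.head?_dropWhile_not (fun x => decide (d < x)) s
              rw [hrest] at this
              simp at this; omega
        subst hs
        have hsufv : ∀ y ∈ suf, y ≤ v :=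
          List.pairwise_cons.mp (List.pairwise_append.mp hpw).2.1 |>.1
        have hpwsuf : List.Pairwise (· ≥ ·) suf :=
          (List.pairwise_cons.mp (List.pairwise_append.mp hpw).2.1).2
        -- the binary search finds v, at position suf.length of the ascending array
        have hasc : (pre ++ v :: suf).reverse ++ tail
            = (suf.reverse ++ [v]) ++ pre.reverse ++ tail := by simp
        have hj : rmlGo ((pre ++ v :: suf).reverse ++ tail) d ((pre ++ v :: suf).length) 0
              ((pre ++ v :: suf).length) = ((suf.length : Nat) : Int) := by
          rw [hasc]
          rw [rmlGo_correct (suf.reverse ++ [v]) pre.reverse tail d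
            (by intro y hy
                simp at hy
                rcases hy with hy | rfl
                · exact le_trans (hsufv y hy) hv
                · exact hv)
            (by intro w hw; exact hpre w (List.mem_reverse.mp hw))
            ((pre ++ v :: suf).length) 0 ((pre ++ v :: suf).length)
            (by omega) (by simp) (by simp) (by simp; omega)]
          simp only [List.length_append, List.length_reverse, List.length_singleton]
          omega
        simp only [hj]
        rw [if_neg (by omega)]
        have hpop : PySem.List.pop? ((pre ++ v :: suf).reverse ++ tail) ((suf.length : Nat) : Int)
            = some (v, suf.reverse ++ (pre.reverse ++ tail)) := by
          have hlt : suf.length < ((pre ++ v :: suf).reverse ++ tail).length := by simp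
          rw [PySem.List.pop?_natCast _ _ hlt]
          have he : (pre ++ v :: suf).reverse ++ tail
              = suf.reverse ++ v :: (pre.reverse ++ tail) := by simp
          simp only [he]
          congr 1
          refine Prod.ext ?_ ?_
          · show (suf.reverse ++ v :: (pre.reverse ++ tail))[suf.length]'(by simp) = v
            rw [List.getElem_append_right (by simp)]
            simp
          · show (suf.reverse ++ v :: (pre.reverse ++ tail)).eraseIdx suf.length
                = suf.reverse ++ (pre.reverse ++ tail)
            rw [List.eraseIdx_append]
            simp
        rw [hpop]
        simp only [Int.toNat_natCast]
        have hrec := ih suf hpwsuf (by simp at hflen; omega) (pre.reverse ++ tail)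
          (d - v) (res ++ [v]) (total - v)
        rw [hrec]
        -- characterise the pass over pre ++ v :: suf
        have hsplit := scanI_append_gt m pre (v :: suf) 0 d hpre hdm
        have hcons1 : (scanI m (v :: suf) 0 d).1 = v :: (scanI m suf 0 (d - v)).1 := by
          simp only [scanI, if_neg (by omega : ¬ d < m), if_pos hv]
          exact congrArg _ (scanI_k_irrel m suf 1 0 (d - v)).1
        have hcons2 : (scanI m (v :: suf) 0 d).2.2 = (scanI m suf 0 (d - v)).2.2 := by
          simp only [scanI, if_neg (by omega : ¬ d < m), if_pos hv]
          exact (scanI_k_irrel m suf 1 0 (d - v)).2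
        refine Prod.ext ?_ (Prod.ext ?_ ?_)
        · simp [hsplit.2, hcons2]
        · simp [hsplit.1, hcons1]
        · simp only [hsplit.1, hcons1, List.sum_cons]
          omega
      · -- nothing fits: the search returns -1 immediately and nothing is picked
        push Not at hex
        have hj : rmlGo (s.reverse ++ tail) d s.length 0 s.length = -1 := by
          have := rmlGo_correct [] s.reverse tail d (by simp)
            (by intro w hw; exact hex w (List.mem_reverse.mp hw))
            s.length 0 s.length (by omega) (by simp) (by simp) (by simp)
          simpa using this
        simp only [hj]
        rw [if_pos (by omega)]
        rw [scanI_nopick m s 0 d hdm hex]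
        simp
    · rw [if_neg hdm]
      rcases s with _ | ⟨v, t⟩
      · simp [scanI]
      · simp only [scanI, if_pos (by omega : d < m)]
        simp

theorem outer_eq (max_th : Int) : ∀ (fuel : Nat) (s : List Int),
    List.Pairwise (· ≥ ·) s →
    ∀ (result : List (List Int)) (res : List Int) (diff loss : Int),
    aLoop max_th fuel s result res diff loss
      = bLoop max_th fuel s.reverse s.sum result res diff loss := by
  intro fuel
  induction fuel with
  | zero => intro s _ result res diff loss; rfl
  | succ fuel ih =>
    intro s hpw result res diff loss
    rcases s with _ | ⟨v, t⟩
    · rfl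
    · have hpwt : List.Pairwise (· ≥ ·) t := (List.pairwise_cons.mp hpw).2
      have hrev : (v :: t).reverse = t.reverse ++ [v] := by simp
      rw [aLoop, bLoop]
      rw [if_neg (show ¬((v :: t).isEmpty = true) by simp),
          if_neg (show ¬(((v :: t).reverse).isEmpty = true) by rw [hrev]; simp)]
      have etop : (v :: t).reverse.getLastD 0 = v := by rw [hrev]; exact List.getLastD_concat
      have ehead : (v :: t).headD 0 = v := rfl
      have edrop : (v :: t).reverse.dropLast = t.reverse := by rw [hrev]; exact List.dropLast_concat
      have esum : (v :: t).sum - v = t.sum := by simp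
      simp only [etop, ehead, edrop]
      by_cases c1 : max_th ≤ v
      · rw [if_pos c1, if_pos c1]
        show aLoop max_th fuel t result (res ++ [v]) diff loss
          = bLoop max_th fuel t.reverse ((v :: t).sum - v) result (res ++ [v]) diff loss
        rw [esum]
        exact ih t hpwt result (res ++ [v]) diff loss
      · rw [if_neg c1, if_neg c1]
        by_cases c2 : diff = max_th ∧ (v :: t).sum ≤ max_th
        · rw [if_pos c2, if_pos c2, hrev]
          simp
        · rw [if_neg c2, if_neg c2]
          by_cases c3 : v ≤ diff
          · rw [if_pos c3, if_pos c3]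
            show aLoop max_th fuel t result (res ++ [v]) (diff - v) loss
              = bLoop max_th fuel t.reverse ((v :: t).sum - v) result (res ++ [v]) (diff - v) loss
            rw [esum]
            exact ih t hpwt result (res ++ [v]) (diff - v) loss
          · rw [if_neg c3, if_neg c3]
            have em : (v :: t).reverse.headD 0 = (v :: t).getLastD 0 := by
              rw [List.headD_eq_head?_getD, List.head?_reverse, List.getLastD_eq_getLast?]
            simp only [em]
            by_cases c4 : (v :: t).getLastD 0 ≤ diff
            · simp only [if_pos c4]
              -- A's pass, characterised by scanI
              have ha := innerForA_eq ((v :: t).getLastD 0) (v :: t) 0 diff res []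
              have hf := scanI_filter ((v :: t).getLastD 0) (v :: t) 0 diff [] (by simp)
              -- B's pass, characterised by the same scanI
              have hb := bInner_eq ((v :: t).getLastD 0) ((v :: t).length + 1) (v :: t) hpw
                (by omega) [] diff res ((v :: t).sum)
              simp only [List.append_nil] at hb
              rw [← List.length_reverse (as := v :: t)] at hb
              simp only [ha, hb]
              rw [List.nil_append] at *
              set P := (scanI ((v :: t).getLastD 0) (v :: t) 0 diff).1 with hP
              set K := (scanI ((v :: t).getLastD 0) (v :: t) 0 diff).2.2 with hK
              have hKsum : (v :: t).sum - P.sum = K.sum := by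
                have h := scanI_sum ((v :: t).getLastD 0) (v :: t) 0 diff
                rw [← hP, ← hK] at h
                omega
              have hKpw : List.Pairwise (· ≥ ·) K :=
                hpw.sublist (scanI_kept_sublist ((v :: t).getLastD 0) (v :: t) 0 diff)
              show aLoop max_th fuel _ (result ++ [res ++ P]) [] max_th
                  (loss + (max_th - (res ++ P).sum))
                = bLoop max_th fuel K.reverse ((v :: t).sum - P.sum) (result ++ [res ++ P]) []
                    max_th (loss + (max_th - (res ++ P).sum))
              rw [hf, hKsum]
              exact ih K hKpw (result ++ [res ++ P]) [] max_th (loss + (max_th - (res ++ P).sum))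
            · simp only [if_neg c4]
              show aLoop max_th fuel (v :: t) (result ++ [res]) [] max_th
                  (loss + (max_th - res.sum))
                = bLoop max_th fuel (v :: t).reverse ((v :: t).sum) (result ++ [res]) [] max_th
                    (loss + (max_th - res.sum))
              exact ih (v :: t) hpw (result ++ [res]) [] max_th (loss + (max_th - res.sum))

theorem sorted_desc_eq (data : List Int) :
    PySem.List.sorted data (fun x => x) true
      = (PySem.List.sorted data (fun x => x) false).reverse := by
  refine List.Perm.eq_of_pairwise (le := fun a b => b ≤ a)
    (fun a b _ _ h1 h2 => le_antisymm h2 h1)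
    (PySem.List.sorted_pairwise_rev data (fun x => x))
    (List.pairwise_reverse.mpr (PySem.List.sorted_pairwise data (fun x => x)))
    (((PySem.List.sorted_perm data (fun x => x) true).trans
      ((PySem.List.sorted_perm data (fun x => x) false).symm)).trans
      (List.reverse_perm _).symm)

-- ===== VERDICT (by name: the statement is the Claim_ definition above) =====
theorem init_groups_spec : Claim_equal_init_groups := by
  intro data max_th _
  unfold Spec_init_groups init_groups init_groups_alt
  rw [sorted_desc_eq]
  rw [outer_eq max_th (2 * data.length + 1) ((PySem.List.sorted data (fun x => x) false).reverse)
    (List.pairwise_reverse.mpr (PySem.List.sorted_pairwise data (fun x => x)))]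
  simp
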